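-- pv_equiv track=rewrite | github.com/BDMX18/PYX18 | CLASS/OCT/DAY-3/06.py | palindrome_string
-- ===== SOURCE A (Python) =====
-- def palindrome_string(ip_str):
--   result_list = []
--   for i in range(len(ip_str)):
--     for j in range(i+1, len(ip_str)):
--       sub_str = ip_str[i:j+1]
--       if sub_str == sub_str[::-1]:
--         if sub_str not in result_list:
--           result_list.append(sub_str)
--   return result_list
-- ===== SOURCE B (Python) =====
-- def palindrome_string(ip_str):
--     n = len(ip_str)
--     # DP over index pairs: (i, j) in pal  iff  ip_str[i:j+1] is a palindrome.
--     # Filled bottom-up (rows i descending), so each pair costs O(1) instead of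
--     # building and reversing the substring.
--     pal = set()
--     for i in range(n - 1, -1, -1):
--         for j in range(i + 1, n):
--             if ip_str[i] == ip_str[j] and (j - i <= 2 or (i + 1, j - 1) in pal):
--                 pal.add((i, j))
--     seen = set()
--     result_list = []
--     for i in range(n):
--         for j in range(i + 1, n):
--             if (i, j) in pal:
--                 sub = ip_str[i:j + 1]
--                 if sub not in seen:
--                     seen.add(sub)
--                     result_list.append(sub)
--     return result_list
-- ===== Notes on version B (the rewrite author's own statement) =====
-- stated objective: faster
-- what changed: Replaces the per-pair substring build-reverse-compare and the O(k) list membership dedup with a bottom-up DP set of palindromic index pairs (each pair decided in O(1) from the inner pair) and a hash-set dedup, scanning (i,j) in the same order.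
import Mathlib
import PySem

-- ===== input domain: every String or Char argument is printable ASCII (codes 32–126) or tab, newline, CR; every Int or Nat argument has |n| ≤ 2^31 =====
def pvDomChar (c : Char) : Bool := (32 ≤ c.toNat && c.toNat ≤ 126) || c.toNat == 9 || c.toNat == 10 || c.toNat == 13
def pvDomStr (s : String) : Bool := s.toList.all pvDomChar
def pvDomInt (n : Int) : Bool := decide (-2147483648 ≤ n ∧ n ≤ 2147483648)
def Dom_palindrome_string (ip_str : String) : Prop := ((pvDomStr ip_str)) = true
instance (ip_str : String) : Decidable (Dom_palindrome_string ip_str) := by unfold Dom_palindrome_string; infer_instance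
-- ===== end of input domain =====

-- B replaces A's per-pair substring build/reverse/compare and its list-membership dedup by a
-- bottom-up DP set of palindromic index pairs plus a hash-set dedup, scanning (i,j) in the same order.

-- ===== PORT A =====
def palindrome_string (ip_str : String) : List String :=
  (PySem.List.pyRange 0 (PySem.Str.len ip_str) 1).foldl (fun result_list i =>
    (PySem.List.pyRange (i + 1) (PySem.Str.len ip_str) 1).foldl (fun result_list j =>
      let sub_str := PySem.Str.slice ip_str (some i) (some (j + 1))
      -- sub_str == sub_str[::-1]; slice? with step -1 is always `some`, so comparing with `some sub_str` is exact
      if some sub_str == PySem.Str.slice? sub_str none none (-1) then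
        if result_list.contains sub_str then result_list else result_list ++ [sub_str]
      else result_list) result_list) []

-- ===== PORT B =====
def palindrome_string_alt (ip_str : String) : List String :=
  let n : Int := PySem.Str.len ip_str
  let pal : PySem.Set (Int × Int) :=
    (PySem.List.pyRange (n - 1) (-1) (-1)).foldl (fun pal i =>
      (PySem.List.pyRange (i + 1) n 1).foldl (fun pal j =>
        if (PySem.Str.pyGet? ip_str i == PySem.Str.pyGet? ip_str j)
            && (decide (j - i ≤ 2) || PySem.Set.contains pal (i + 1, j - 1)) then
          PySem.Set.add pal (i, j)
        else pal) pal) PySem.Set.empty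
  ((PySem.List.pyRange 0 n 1).foldl (fun (st : PySem.Set String × List String) i =>
    (PySem.List.pyRange (i + 1) n 1).foldl (fun st j =>
      if PySem.Set.contains pal (i, j) then
        let sub := PySem.Str.slice ip_str (some i) (some (j + 1))
        if PySem.Set.contains st.1 sub then st
        else (PySem.Set.add st.1 sub, st.2 ++ [sub])
      else st) st) ((PySem.Set.empty : PySem.Set String), ([] : List String))).2

-- ===== PRECONDITION & SPEC =====
def Spec_palindrome_string (ip_str : String) (out : List String) : Prop := out = palindrome_string_alt ip_str
instance (ip_str : String) (out : List String) : Decidable (Spec_palindrome_string ip_str out) := by unfold Spec_palindrome_string; infer_instance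

-- ===== CLAIM (what is proved, stated in full; the proofs are below) =====
def Claim_equal_palindrome_string : Prop := ∀ (ip_str : String), Dom_palindrome_string ip_str → Spec_palindrome_string ip_str (palindrome_string ip_str)

-- ===== LEMMAS AND PROOFS =====

-- membership bridges for Bool-valued `contains`
lemma pvLC_eq {α : Type} [BEq α] [LawfulBEq α] (t : List α) (z : α) :
    t.contains z = decide (z ∈ t) := by
  cases hb : t.contains z
  · have hz : z ∉ t := fun h => by rw [List.contains_iff_mem.mpr h] at hb; cases hb
    simp [hz]
  · simp [List.contains_iff_mem.mp hb]

lemma pvContains_eq {α : Type} [BEq α] [LawfulBEq α] (t : PySem.Set α) (z : α) :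
    PySem.Set.contains t z = decide (z ∈ t) := by
  rw [PySem.Set.contains_eq_listContains]
  exact pvLC_eq t z

lemma pvContains_add {α : Type} [BEq α] [LawfulBEq α] [DecidableEq α] (t : PySem.Set α) (x z : α) :
    PySem.Set.contains (PySem.Set.add t x) z = (PySem.Set.contains t z || decide (z = x)) := by
  by_cases h1 : z ∈ t <;> by_cases h2 : z = x <;>
    simp [PySem.Set.mem_add, h1, h2]

lemma pvContains_empty {α : Type} [BEq α] [LawfulBEq α] (z : α) :
    PySem.Set.contains (PySem.Set.empty : PySem.Set α) z = false := by
  rw [pvContains_eq]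
  simp [PySem.Set.empty]

lemma pvLC_append {α : Type} [BEq α] [LawfulBEq α] [DecidableEq α] (l : List α) (a x : α) :
    (l ++ [a]).contains x = (l.contains x || decide (x = a)) := by
  by_cases h1 : x ∈ l <;> by_cases h2 : x = a <;> simp [h1, h2]

lemma pvBeq_eq_decide {α : Type} [BEq α] [LawfulBEq α] [DecidableEq α] (a b : α) :
    (a == b) = decide (a = b) := by
  by_cases h : a = b
  · subst h; simp
  · simp [h]

-- the palindromicity predicate used throughout: ip_str[i:j+1] equals its own reversal
def pvSub (cs : List Char) (i j : Int) : List Char :=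
  PySem.List.slice cs (some i) (some (j + 1))

def pvSpec (cs : List Char) (i j : Int) : Bool :=
  decide (pvSub cs i j = (pvSub cs i j).reverse)

lemma pvSub_decomp (cs : List Char) (a b : Nat) (hab : a < b) (hb : b < cs.length) :
    pvSub cs ↑a ↑b = cs[a]'(Nat.lt_trans hab hb) :: (pvSub cs (↑a + 1) (↑b - 1) ++ [cs[b]'hb]) := by
  have e1 : ((a : Int)) + 1 = ((a + 1 : Nat) : Int) := by push_cast; ring
  have e2 : ((b : Int)) - 1 + 1 = ((b : Nat) : Int) := by ring
  have e3 : ((b : Int)) + 1 = ((b + 1 : Nat) : Int) := by push_cast; ring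
  unfold pvSub
  rw [e3, e1, e2, PySem.List.slice_natCast, PySem.List.slice_natCast]
  rw [List.drop_eq_getElem_cons (Nat.lt_trans hab hb)]
  have h4 : b + 1 - a = (b - (a + 1) + 1) + 1 := by omega
  rw [h4, List.take_succ_cons]
  congr 1
  rw [List.take_add_one]
  congr 1
  rw [List.getElem?_drop]
  rw [show a + 1 + (b - (a + 1)) = b from by omega]
  rw [List.getElem?_eq_getElem hb]
  rfl

lemma pvPal_cons (u v : Char) (mid : List Char) :
    decide (u :: (mid ++ [v]) = (u :: (mid ++ [v])).reverse)
      = (decide (u = v) && decide (mid = mid.reverse)) := by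
  apply Bool.eq_iff_iff.mpr
  simp only [Bool.and_eq_true, decide_eq_true_eq]
  constructor
  · intro h
    have hrev : (u :: (mid ++ [v])).reverse = v :: (mid.reverse ++ [u]) := by simp
    rw [hrev] at h
    injection h with h1 h2
    subst h1
    refine ⟨rfl, ?_⟩
    have h3 := congrArg List.dropLast h2
    simpa using h3
  · rintro ⟨h1, h2⟩
    subst h1
    rw [show (u :: (mid ++ [u])).reverse = u :: (mid.reverse ++ [u]) from by simp]
    rw [← h2]

lemma pvShort_pal (L : List Char) (h : L.length ≤ 1) : decide (L = L.reverse) = true := by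
  rcases L with _ | ⟨x, _ | ⟨y, t⟩⟩
  · simp
  · simp
  · exfalso; simp only [List.length_cons] at h; omega

lemma pvSpec_small (cs : List Char) (i j : Int) (h0 : 0 ≤ i) (hij : i < j) (h2 : j ≤ i + 2) :
    pvSpec cs (i + 1) (j - 1) = true := by
  unfold pvSpec pvSub
  rw [PySem.List.slice_toNat _ (by omega) (by omega)]
  apply pvShort_pal
  have := List.length_take_le ((j - 1 + 1).toNat - (i + 1).toNat) (List.drop (i + 1).toNat cs)
  omega

lemma pvSpec_rec (cs : List Char) (a b : Nat) (hab : a < b) (hb : b < cs.length) :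
    pvSpec cs ↑a ↑b = (decide (cs[a]? = cs[b]?) && pvSpec cs ((a : Int) + 1) ((b : Int) - 1)) := by
  have ha : a < cs.length := Nat.lt_trans hab hb
  unfold pvSpec
  rw [pvSub_decomp cs a b hab hb, pvPal_cons]
  rw [List.getElem?_eq_getElem ha, List.getElem?_eq_getElem hb]
  congr 1
  exact (decide_eq_decide.mpr Option.some_inj).symm

-- A's palindromicity test equals pvSpec (no range conditions needed)
lemma pvCondA (s : String) (i j : Int) :
    (some (PySem.Str.slice s (some i) (some (j + 1))) ==
      PySem.Str.slice? (PySem.Str.slice s (some i) (some (j + 1))) none none (-1))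
      = pvSpec s.toList i j := by
  rw [PySem.Str.slice?_none_none_neg_one, pvBeq_eq_decide]
  unfold pvSpec
  rw [decide_eq_decide]
  have htl : (PySem.Str.slice s (some i) (some (j + 1))).toList = pvSub s.toList i j := by
    rw [PySem.Str.toList_slice, PySem.Chars.slice_eq_listSlice]; rfl
  constructor
  · intro h
    have h2 := Option.some.inj h
    have h3 : (PySem.Str.slice s (some i) (some (j + 1))).toList
        = (PySem.Str.slice s (some i) (some (j + 1))).toList.reverse := by
      conv_lhs => rw [h2]
      simp
    rw [htl] at h3
    exact h3
  · intro h
    have h3 : (PySem.Str.slice s (some i) (some (j + 1))).toList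
        = (PySem.Str.slice s (some i) (some (j + 1))).toList.reverse := by
      rw [htl]; exact h
    have h4 : String.ofList (PySem.Str.slice s (some i) (some (j + 1))).toList
        = PySem.Str.slice s (some i) (some (j + 1)) := String.toList_inj.mp (by simp)
    rw [← h3, h4]

-- B's DP condition equals pvSpec, given the rows above are already correct
lemma pvCondB (s : String) (pal : PySem.Set (Int × Int)) (m j : Int)
    (h0 : 0 ≤ m) (hmj : m < j) (hj : j < (s.toList.length : Int))
    (hCorr : ∀ i' j' : Int, m + 1 ≤ i' → i' < j' → j' < (s.toList.length : Int) →
        PySem.Set.contains pal (i', j') = pvSpec s.toList i' j') :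
    ((PySem.Str.pyGet? s m == PySem.Str.pyGet? s j) &&
        (decide (j - m ≤ 2) || PySem.Set.contains pal (m + 1, j - 1))) = pvSpec s.toList m j := by
  obtain ⟨a, rfl⟩ : ∃ a : Nat, (a : Int) = m := ⟨m.toNat, Int.toNat_of_nonneg h0⟩
  obtain ⟨b, rfl⟩ : ∃ b : Nat, (b : Int) = j := ⟨j.toNat, Int.toNat_of_nonneg (by omega)⟩
  have hab : a < b := by omega
  have hbl : b < s.toList.length := by omega
  rw [PySem.Str.pyGet?_natCast, PySem.Str.pyGet?_natCast, pvSpec_rec s.toList a b hab hbl,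
    pvBeq_eq_decide]
  by_cases h2 : (b : Int) - (a : Int) ≤ 2
  · have hsmall := pvSpec_small s.toList ↑a ↑b (by omega) (by omega) (by omega)
    simp [h2, hsmall]
  · have hc := hCorr ((a : Int) + 1) ((b : Int) - 1) (by omega) (by omega) (by omega)
    rw [pvContains_eq] at hc
    simp [h2, hc]

-- the loop bodies of the two ports, as named helpers (definitionally equal to the port lambdas)
def pvStep1 (s : String) (m : Int) (pal : PySem.Set (Int × Int)) (j : Int) : PySem.Set (Int × Int) :=
  if (PySem.Str.pyGet? s m == PySem.Str.pyGet? s j)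
      && (decide (j - m ≤ 2) || PySem.Set.contains pal (m + 1, j - 1)) then
    PySem.Set.add pal (m, j)
  else pal

def pvOuter1 (s : String) (n : Int) (pal : PySem.Set (Int × Int)) (i : Int) : PySem.Set (Int × Int) :=
  (PySem.List.pyRange (i + 1) n 1).foldl (pvStep1 s i) pal

def pvStep2A (s : String) (i : Int) (result_list : List String) (j : Int) : List String :=
  if some (PySem.Str.slice s (some i) (some (j + 1))) ==
      PySem.Str.slice? (PySem.Str.slice s (some i) (some (j + 1))) none none (-1) then
    if result_list.contains (PySem.Str.slice s (some i) (some (j + 1))) then result_list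
    else result_list ++ [PySem.Str.slice s (some i) (some (j + 1))]
  else result_list

def pvStep2B (s : String) (pal : PySem.Set (Int × Int)) (i : Int)
    (st : PySem.Set String × List String) (j : Int) : PySem.Set String × List String :=
  if PySem.Set.contains pal (i, j) then
    if PySem.Set.contains st.1 (PySem.Str.slice s (some i) (some (j + 1))) then st
    else (PySem.Set.add st.1 (PySem.Str.slice s (some i) (some (j + 1))),
          st.2 ++ [PySem.Str.slice s (some i) (some (j + 1))])
  else st

def pvOuter2A (s : String) (n : Int) (result_list : List String) (i : Int) : List String :=
  (PySem.List.pyRange (i + 1) n 1).foldl (pvStep2A s i) result_list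

def pvOuter2B (s : String) (n : Int) (pal : PySem.Set (Int × Int))
    (st : PySem.Set String × List String) (i : Int) : PySem.Set String × List String :=
  (PySem.List.pyRange (i + 1) n 1).foldl (pvStep2B s pal i) st

lemma pvNodupAux : ∀ (k : Nat) (a b : Int), (b - a).toNat ≤ k → (PySem.List.pyRange a b 1).Nodup := by
  intro k
  induction k with
  | zero =>
    intro a b h
    have hnil : PySem.List.pyRange a b 1 = [] := by
      apply List.eq_nil_iff_forall_not_mem.mpr
      intro x hx
      rw [PySem.List.mem_pyRange_one] at hx
      omega
    simp [hnil]
  | succ k ih =>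
    intro a b h
    by_cases hab : a < b
    · rw [PySem.List.pyRange_one_cons hab]
      refine List.nodup_cons.mpr ⟨?_, ih (a + 1) b (by omega)⟩
      intro hx
      rw [PySem.List.mem_pyRange_one] at hx
      omega
    · have hnil : PySem.List.pyRange a b 1 = [] := by
        apply List.eq_nil_iff_forall_not_mem.mpr
        intro x hx
        rw [PySem.List.mem_pyRange_one] at hx
        omega
      simp [hnil]

-- filling one row m of the DP set
lemma pvRowFill (s : String) (m : Int) (h0 : 0 ≤ m) :
    ∀ (js : List Int) (pal : PySem.Set (Int × Int)),
      js.Nodup →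
      (∀ j ∈ js, m < j ∧ j < (s.toList.length : Int)) →
      (∀ i' j' : Int, m + 1 ≤ i' → i' < j' → j' < (s.toList.length : Int) →
          PySem.Set.contains pal (i', j') = pvSpec s.toList i' j') →
      (∀ j ∈ js, PySem.Set.contains pal (m, j) = false) →
      ((∀ k : Int × Int, k.1 ≠ m →
          PySem.Set.contains (js.foldl (pvStep1 s m) pal) k = PySem.Set.contains pal k) ∧
       (∀ j ∈ js, PySem.Set.contains (js.foldl (pvStep1 s m) pal) (m, j) = pvSpec s.toList m j) ∧
       (∀ j, j ∉ js → PySem.Set.contains (js.foldl (pvStep1 s m) pal) (m, j)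
          = PySem.Set.contains pal (m, j))) := by
  intro js
  induction js with
  | nil =>
    intro pal _ _ _ _
    exact ⟨fun k _ => rfl, fun j hj => absurd hj (List.not_mem_nil), fun j _ => rfl⟩
  | cons j₀ t ih =>
    intro pal hnd hjs hCorr hrow0
    have hj₀ := hjs j₀ (by simp)
    have hcond : ((PySem.Str.pyGet? s m == PySem.Str.pyGet? s j₀) &&
        (decide (j₀ - m ≤ 2) || PySem.Set.contains pal (m + 1, j₀ - 1))) = pvSpec s.toList m j₀ :=
      pvCondB s pal m j₀ h0 hj₀.1 hj₀.2 hCorr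
    have hstep : pvStep1 s m pal j₀
        = if pvSpec s.toList m j₀ = true then PySem.Set.add pal (m, j₀) else pal := by
      unfold pvStep1
      rw [hcond]
    have hP1 : ∀ k : Int × Int, k ≠ (m, j₀) →
        PySem.Set.contains (pvStep1 s m pal j₀) k = PySem.Set.contains pal k := by
      intro k hk
      rw [hstep]
      split
      · rw [pvContains_add]; simp [hk]
      · rfl
    have hP2 : PySem.Set.contains (pvStep1 s m pal j₀) (m, j₀) = pvSpec s.toList m j₀ := by
      rw [hstep]
      split
      · rename_i h
        rw [pvContains_add]; simp [h]
      · rename_i h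
        simp only [Bool.not_eq_true] at h
        rw [hrow0 j₀ (by simp), h]
    have hCorr₁ : ∀ i' j' : Int, m + 1 ≤ i' → i' < j' → j' < (s.toList.length : Int) →
        PySem.Set.contains (pvStep1 s m pal j₀) (i', j') = pvSpec s.toList i' j' := by
      intro i' j' h1 h2 h3
      rw [hP1 (i', j') (by intro he; rw [Prod.mk.injEq] at he; omega)]
      exact hCorr i' j' h1 h2 h3
    have hrow0₁ : ∀ j ∈ t, PySem.Set.contains (pvStep1 s m pal j₀) (m, j) = false := by
      intro j hj
      have hne : j ≠ j₀ := by rintro rfl; exact (List.nodup_cons.mp hnd).1 hj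
      rw [hP1 (m, j) (by simp [hne])]
      exact hrow0 j (List.mem_cons_of_mem _ hj)
    have hjs' : ∀ j ∈ t, m < j ∧ j < (s.toList.length : Int) :=
      fun j hj => hjs j (List.mem_cons_of_mem _ hj)
    obtain ⟨c1, c2, c3⟩ := ih (pvStep1 s m pal j₀) (List.nodup_cons.mp hnd).2 hjs' hCorr₁ hrow0₁
    simp only [List.foldl_cons]
    refine ⟨?_, ?_, ?_⟩
    · intro k hk
      rw [c1 k hk, hP1 k (by intro he; rw [he] at hk; exact hk rfl)]
    · intro j hj
      rcases List.mem_cons.mp hj with rfl | hj'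
      · rw [c3 j (List.nodup_cons.mp hnd).1, hP2]
      · exact c2 j hj'
    · intro j hj
      have h1 : j ∉ t := fun h => hj (List.mem_cons_of_mem _ h)
      have h2 : j ≠ j₀ := fun h => hj (h ▸ List.mem_cons_self)
      rw [c3 j h1, hP1 (m, j) (by simp [h2])]

-- filling all rows mm-1, …, 0
lemma pvFill (s : String) (n : Int) (hn : n = (s.toList.length : Int)) :
    ∀ (mm : Nat) (pal : PySem.Set (Int × Int)),
      (∀ i' j' : Int, (mm : Int) ≤ i' → i' < j' → j' < (s.toList.length : Int) →
          PySem.Set.contains pal (i', j') = pvSpec s.toList i' j') →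
      (∀ i' j' : Int, i' < (mm : Int) → PySem.Set.contains pal (i', j') = false) →
      ∀ i j : Int, 0 ≤ i → i < j → j < (s.toList.length : Int) →
        PySem.Set.contains
          ((((List.range mm).map Int.ofNat).reverse).foldl (pvOuter1 s n) pal)
          (i, j) = pvSpec s.toList i j := by
  subst hn
  intro mm
  induction mm with
  | zero =>
    intro pal hCorr _ i j h0 hij hj
    simp only [List.range_zero, List.map_nil, List.reverse_nil, List.foldl_nil]
    exact hCorr i j (by omega) hij hj
  | succ mm ih =>
    intro pal hCorr hLow i j h0 hij hj
    have hsplit : ((List.range (mm + 1)).map Int.ofNat).reverse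
        = ((mm : Nat) : Int) :: ((List.range mm).map Int.ofNat).reverse := by
      rw [List.range_succ, List.map_append, List.reverse_append]
      simp
    rw [hsplit, List.foldl_cons]
    have hrow := pvRowFill s ↑mm (Int.natCast_nonneg mm)
      (PySem.List.pyRange (↑mm + 1) (s.toList.length : Int) 1) pal
      (pvNodupAux ((s.toList.length : Int) - (↑mm + 1)).toNat (↑mm + 1) _ le_rfl)
      (fun j' hj' => by rw [PySem.List.mem_pyRange_one] at hj'; exact ⟨by omega, hj'.2⟩)
      (fun i' j' h1 h2 h3 => hCorr i' j' (by omega) h2 h3)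
      (fun j' _ => hLow ↑mm j' (by omega))
    obtain ⟨c1, c2, c3⟩ := hrow
    have hrfl : pvOuter1 s (s.toList.length : Int) pal ↑mm
        = (PySem.List.pyRange (↑mm + 1) (s.toList.length : Int) 1).foldl (pvStep1 s ↑mm) pal := rfl
    have hCorr₁ : ∀ i' j' : Int, (mm : Int) ≤ i' → i' < j' → j' < (s.toList.length : Int) →
        PySem.Set.contains (pvOuter1 s (s.toList.length : Int) pal ↑mm) (i', j')
          = pvSpec s.toList i' j' := by
      intro i' j' h1 h2 h3
      rw [hrfl]
      by_cases he : i' = (mm : Int)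
      · subst he
        exact c2 j' (PySem.List.mem_pyRange_one.mpr ⟨by omega, by omega⟩)
      · rw [c1 (i', j') he]
        exact hCorr i' j' (by omega) h2 h3
    have hLow₁ : ∀ i' j' : Int, i' < (mm : Int) →
        PySem.Set.contains (pvOuter1 s (s.toList.length : Int) pal ↑mm) (i', j') = false := by
      intro i' j' h1
      rw [hrfl, c1 (i', j') (by intro he; have h1' : i' = (mm : Int) := he; omega)]
      exact hLow i' j' (by omega)
    exact ih (pvOuter1 s (s.toList.length : Int) pal ↑mm) hCorr₁ hLow₁ i j h0 hij hj

-- the finished DP set decides palindromicity of every in-range pair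
lemma pvPalFinal (s : String) (n : Int) (hn : n = (s.toList.length : Int)) (i j : Int)
    (h0 : 0 ≤ i) (hij : i < j) (hj : j < n) :
    PySem.Set.contains
      ((PySem.List.pyRange (n - 1) (-1) (-1)).foldl (pvOuter1 s n) PySem.Set.empty) (i, j)
      = pvSpec s.toList i j := by
  subst hn
  have h1 : PySem.List.pyRange ((s.toList.length : Int) - 1) (-1) (-1)
      = ((List.range s.toList.length).map Int.ofNat).reverse := by
    rw [PySem.List.pyRange_neg_one_eq_reverse]
    rw [show ((-1 : Int) + 1) = 0 from by ring]
    rw [show ((s.toList.length : Int) - 1 + 1) = (s.toList.length : Int) from by ring]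
    rw [PySem.List.pyRange_zero_natCast]
    rfl
  rw [h1]
  exact pvFill s (s.toList.length : Int) rfl s.toList.length PySem.Set.empty
    (fun i' j' hge hlt hlt2 => ((by omega : False)).elim)
    (fun i' j' _ => pvContains_empty _)
    i j h0 hij hj

-- phase 2, inner loop: A's list-dedup and B's set-dedup stay in lockstep
lemma pvPhase2Inner (s : String) (pal : PySem.Set (Int × Int)) (i : Int) :
    ∀ (js : List Int) (st : PySem.Set String × List String),
      (∀ x : String, PySem.Set.contains st.1 x = st.2.contains x) →
      (∀ j ∈ js, PySem.Set.contains pal (i, j) = pvSpec s.toList i j) →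
      (js.foldl (pvStep2A s i) st.2 = (js.foldl (pvStep2B s pal i) st).2 ∧
       ∀ x : String, PySem.Set.contains (js.foldl (pvStep2B s pal i) st).1 x
          = ((js.foldl (pvStep2B s pal i) st).2).contains x) := by
  intro js
  induction js with
  | nil => intro st hseen _; exact ⟨rfl, hseen⟩
  | cons j₀ t ih =>
    intro st hseen hc
    have hcB := hc j₀ (by simp)
    have key : pvStep2A s i st.2 j₀ = (pvStep2B s pal i st j₀).2 ∧
        (∀ x : String, PySem.Set.contains (pvStep2B s pal i st j₀).1 x
          = ((pvStep2B s pal i st j₀).2).contains x) := by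
      unfold pvStep2A pvStep2B
      rw [pvCondA s i j₀, hcB]
      by_cases hsp : pvSpec s.toList i j₀ = true
      · rw [if_pos hsp, if_pos hsp, hseen]
        by_cases hm : st.2.contains (PySem.Str.slice s (some i) (some (j₀ + 1))) = true
        · rw [if_pos hm, if_pos hm]
          exact ⟨rfl, hseen⟩
        · rw [if_neg hm, if_neg hm]
          refine ⟨rfl, fun x => ?_⟩
          dsimp only
          rw [pvContains_add, pvLC_append, hseen x]
      · rw [if_neg hsp, if_neg hsp]
        exact ⟨rfl, hseen⟩
    obtain ⟨k1, k2⟩ := key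
    simp only [List.foldl_cons]
    rw [k1]
    exact ih (pvStep2B s pal i st j₀) k2 (fun j hj => hc j (List.mem_cons_of_mem _ hj))

-- phase 2, outer loop
lemma pvPhase2Outer (s : String) (n : Int) (pal : PySem.Set (Int × Int))
    (hc : ∀ i j : Int, 0 ≤ i → i < j → j < n →
        PySem.Set.contains pal (i, j) = pvSpec s.toList i j) :
    ∀ (is : List Int) (st : PySem.Set String × List String),
      (∀ x : String, PySem.Set.contains st.1 x = st.2.contains x) →
      (∀ i ∈ is, 0 ≤ i) →
      (is.foldl (pvOuter2A s n) st.2 = (is.foldl (pvOuter2B s n pal) st).2 ∧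
       ∀ x : String, PySem.Set.contains (is.foldl (pvOuter2B s n pal) st).1 x
          = ((is.foldl (pvOuter2B s n pal) st).2).contains x) := by
  intro is
  induction is with
  | nil => intro st hseen _; exact ⟨rfl, hseen⟩
  | cons i₀ t ih =>
    intro st hseen hpos
    have hinner := pvPhase2Inner s pal i₀ (PySem.List.pyRange (i₀ + 1) n 1) st hseen
      (fun j hj => by
        rw [PySem.List.mem_pyRange_one] at hj
        exact hc i₀ j (hpos i₀ (by simp)) (by omega) (by omega))
    obtain ⟨k1, k2⟩ := hinner
    have e1 : pvOuter2A s n st.2 i₀ = (pvOuter2B s n pal st i₀).2 := k1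
    have e2 : ∀ x : String, PySem.Set.contains (pvOuter2B s n pal st i₀).1 x
        = ((pvOuter2B s n pal st i₀).2).contains x := k2
    simp only [List.foldl_cons]
    rw [e1]
    exact ih (pvOuter2B s n pal st i₀) e2 (fun i hi => hpos i (List.mem_cons_of_mem _ hi))

lemma pvMain (s : String) : palindrome_string s = palindrome_string_alt s := by
  unfold palindrome_string palindrome_string_alt
  exact (pvPhase2Outer s (PySem.Str.len s)
      ((PySem.List.pyRange (PySem.Str.len s - 1) (-1) (-1)).foldl
        (pvOuter1 s (PySem.Str.len s)) PySem.Set.empty)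
      (fun i j h0 hij hj => pvPalFinal s (PySem.Str.len s) (PySem.Str.len_eq s) i j h0 hij hj)
      (PySem.List.pyRange 0 (PySem.Str.len s) 1)
      ((PySem.Set.empty : PySem.Set String), ([] : List String))
      (fun x => by rw [pvContains_empty]; rfl)
      (fun i hi => by rw [PySem.List.mem_pyRange_one] at hi; exact hi.1)).1

-- ===== VERDICT (by name: the statement is the Claim_ definition above) =====
theorem palindrome_string_spec : Claim_equal_palindrome_string := by
  intro s _
  show palindrome_string s = palindrome_string_alt s
  exact pvMain s
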